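-- pv_equiv track=rewrite | github.com/ashuraGami/advent_code | anio2020/adventCode.py | puzzle10
-- ===== SOURCE A (Python) =====
-- from math import floor,ceil
--
-- def puzzle10(inputList):
--     seatsList = []
--     for code in inputList:
--         rows,columns = [0,127],[0,7]
--         for w in code:
--             if w == "F":
--                 flr = floor((rows[0]+rows[1])/2)
--                 rows = [rows[0],flr]
--             elif w == "B":
--                 cl = ceil((rows[0]+rows[1])/2)
--                 rows = [cl,rows[1]]
--             elif w == "L":
--                 flr = floor((columns[0]+columns[1])/2)
--                 columns = [columns[0],flr]
--             elif w == "R":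
--                 cl = ceil((columns[0]+columns[1])/2)
--                 columns= [cl,columns[1]]
--         rspns = rows[0]*8+columns[0]
--         seatsList.append(rspns)
--     seatsList = sorted(seatsList)
--     for i in range(len(seatsList)-1):
--         remain = seatsList[i+1]-seatsList[i]
--         if remain == 2:
--             return seatsList[i+1]-1
-- ===== SOURCE B (Python) =====
-- def puzzle10(inputList):
--     seats = set()
--     for code in inputList:
--         rlo, rhi, clo, chi = 0, 127, 0, 7
--         for w in code:
--             if w == "F":
--                 rhi = (rlo + rhi) // 2
--             elif w == "B":
--                 rlo = (rlo + rhi + 1) // 2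
--             elif w == "L":
--                 chi = (clo + chi) // 2
--             elif w == "R":
--                 clo = (clo + chi + 1) // 2
--         seats.add(rlo * 8 + clo)
--     if not seats:
--         return None
--     for m in range(min(seats) + 1, max(seats)):
--         if m not in seats and (m - 1) in seats and (m + 1) in seats:
--             return m
--     return None
-- ===== Notes on version B (the rewrite author's own statement) =====
-- stated objective: alternative
-- what changed: B decodes each seat by narrowing integer lo/hi bounds with floor division instead of float floor/ceil on 2-element lists, collects the ids in a set, and finds the missing seat by scanning candidates ascending from min(ids)+1 to max(ids)-1 for an id absent from the set whose two neighbours are present, replacing A's sort-then-adjacent-gap scan.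
import Mathlib
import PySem

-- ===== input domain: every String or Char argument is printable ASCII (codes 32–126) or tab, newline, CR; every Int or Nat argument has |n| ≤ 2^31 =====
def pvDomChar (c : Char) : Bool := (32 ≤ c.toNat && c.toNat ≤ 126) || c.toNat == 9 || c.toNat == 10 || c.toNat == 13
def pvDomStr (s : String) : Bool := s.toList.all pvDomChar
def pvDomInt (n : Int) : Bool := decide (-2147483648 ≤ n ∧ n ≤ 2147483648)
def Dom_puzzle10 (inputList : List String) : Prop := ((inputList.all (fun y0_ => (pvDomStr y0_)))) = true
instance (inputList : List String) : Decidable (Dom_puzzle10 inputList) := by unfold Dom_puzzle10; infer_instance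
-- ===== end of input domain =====

-- B replaces A's sort-then-adjacent-gap scan by a set of seat ids and an ascending scan over
-- the candidate range (min+1 .. max-1) for an absent id with both neighbours present (alternative algorithm).


-- ===== PORT A =====
-- A's inner loop: rows/columns are 2-element lists, narrowed by floor((lo+hi)/2) / ceil((lo+hi)/2).
-- The float division is exact here (values ≤ 254), so floor(s/2) = s//2 and ceil(s/2) = -((-s)//2).
def pvStepA (st : (Int × Int) × (Int × Int)) (w : Char) : (Int × Int) × (Int × Int) :=
  let rows := st.1
  let columns := st.2
  if w = 'F' then ((rows.1, PySem.Int.floordiv (rows.1 + rows.2) 2), columns)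
  else if w = 'B' then ((-(PySem.Int.floordiv (-(rows.1 + rows.2)) 2), rows.2), columns)
  else if w = 'L' then (rows, (columns.1, PySem.Int.floordiv (columns.1 + columns.2) 2))
  else if w = 'R' then (rows, (-(PySem.Int.floordiv (-(columns.1 + columns.2)) 2), columns.2))
  else st

def pvDecodeA (code : String) : Int :=
  let st := code.toList.foldl pvStepA ((0, 127), (0, 7))
  st.1.1 * 8 + st.2.1

-- 'for i in range(len(t)-1): if t[i+1]-t[i]==2: return t[i+1]-1' as the adjacent-pair scan
def pvFindGapA : List Int → Option Int
  | a :: b :: r => if b - a = 2 then some (b - 1) else pvFindGapA (b :: r)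
  | _ => none

def puzzle10 (inputList : List String) : Option Int :=
  let seatsList := inputList.foldl (fun acc code => acc ++ [pvDecodeA code]) []
  let seatsList := PySem.List.sorted seatsList (fun x => x) false
  pvFindGapA seatsList

-- ===== PORT B =====
def pvStepB (st : Int × Int × Int × Int) (w : Char) : Int × Int × Int × Int :=
  let rlo := st.1; let rhi := st.2.1; let clo := st.2.2.1; let chi := st.2.2.2
  if w = 'F' then (rlo, PySem.Int.floordiv (rlo + rhi) 2, clo, chi)
  else if w = 'B' then (PySem.Int.floordiv (rlo + rhi + 1) 2, rhi, clo, chi)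
  else if w = 'L' then (rlo, rhi, clo, PySem.Int.floordiv (clo + chi) 2)
  else if w = 'R' then (rlo, rhi, PySem.Int.floordiv (clo + chi + 1) 2, chi)
  else st

def pvDecodeB (code : String) : Int :=
  let st := code.toList.foldl pvStepB (0, 127, 0, 7)
  st.1 * 8 + st.2.2.1

def puzzle10_alt (inputList : List String) : Option Int :=
  let seats : PySem.Set Int :=
    inputList.foldl (fun s code => PySem.Set.add s (pvDecodeB code)) PySem.Set.empty
  match PySem.List.min? seats (fun x => x), PySem.List.max? seats (fun x => x) with
  | some mn, some mx =>
      (PySem.List.pyRange (mn + 1) mx 1).find?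
        (fun m => !(PySem.Set.contains seats m) && PySem.Set.contains seats (m - 1)
                  && PySem.Set.contains seats (m + 1))
  | _, _ => none

-- ===== PRECONDITION & SPEC =====
def Spec_puzzle10 (inputList : List String) (out : Option Int) : Prop := out = puzzle10_alt inputList
instance (inputList : List String) (out : Option Int) : Decidable (Spec_puzzle10 inputList out) := by unfold Spec_puzzle10; infer_instance

-- ===== CLAIM (what is proved, stated in full; the proofs are below) =====
def Claim_equal_puzzle10 : Prop := ∀ (inputList : List String), Dom_puzzle10 inputList → Spec_puzzle10 inputList (puzzle10 inputList)

-- ===== LEMMAS AND PROOFS =====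

-- decode equality: B's lo/hi floor-division narrowing computes A's list-pair narrowing
def pvIso (st : (Int × Int) × (Int × Int)) : Int × Int × Int × Int :=
  (st.1.1, st.1.2, st.2.1, st.2.2)

theorem pv_step_comm (st : (Int × Int) × (Int × Int)) (w : Char) :
    pvIso (pvStepA st w) = pvStepB (pvIso st) w := by
  obtain ⟨⟨a, b⟩, c, d⟩ := st
  simp only [pvStepA, pvStepB, pvIso]
  split_ifs <;> (try rfl) <;> simp <;> omega

theorem pv_fold_comm (l : List Char) (st : (Int × Int) × (Int × Int)) :
    pvIso (l.foldl pvStepA st) = l.foldl pvStepB (pvIso st) := by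
  induction l generalizing st with
  | nil => rfl
  | cons w l ih => simp only [List.foldl_cons, ih, pv_step_comm]

theorem pv_decode_eq (code : String) : pvDecodeA code = pvDecodeB code := by
  have h := pv_fold_comm code.toList ((0, 127), (0, 7))
  simp only [pvIso] at h
  simp only [pvDecodeA, pvDecodeB]
  rw [← h]

-- any list containing an adjacent pair (a, a+2) makes the scan return something
theorem pv_gap_isSome (u : List Int) (a : Int) (v : List Int) :
    (pvFindGapA (u ++ a :: (a + 2) :: v)).isSome := by
  induction u with
  | nil => simp [pvFindGapA]
  | cons x u ih =>
      cases h : u ++ a :: (a + 2) :: v with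
      | nil => simp at h
      | cons c rest =>
          rw [List.cons_append, h]
          simp only [pvFindGapA]
          split
          · rfl
          · rw [← h]; exact ih

-- sorted split around a missing middle element
theorem pv_split_of_mem (t : List Int) (m : Int) (hs : t.Pairwise (· ≤ ·))
    (h1 : (m - 1) ∈ t) (h2 : (m + 1) ∈ t) (h0 : m ∉ t) :
    ∃ u v, t = u ++ (m - 1) :: (m + 1) :: v := by
  induction t with
  | nil => simp at h1
  | cons x r ih =>
      rw [List.pairwise_cons] at hs
      obtain ⟨hx, hr⟩ := hs
      rw [List.mem_cons] at h1 h2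
      have h0r : m ∉ r := fun hc => h0 (List.mem_cons_of_mem _ hc)
      have hm2 : m + 1 ∈ r := by
        rcases h2 with h2 | h2
        · exfalso
          rcases h1 with h1 | h1
          · omega
          · have := hx _ h1; omega
        · exact h2
      by_cases hmr : m - 1 ∈ r
      · obtain ⟨u, v, huv⟩ := ih hr hmr hm2 h0r
        exact ⟨x :: u, v, by simp [huv]⟩
      · have hx1 : m - 1 = x := by
          rcases h1 with h1 | h1
          · exact h1
          · exact absurd h1 hmr
        cases r with
        | nil => simp at hm2
        | cons y r' =>
            have hy1 : x ≤ y := hx _ (List.mem_cons_self ..)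
            have hy2 : y ≠ m - 1 := fun h => hmr (h ▸ List.mem_cons_self ..)
            have hy3 : y ≠ m := fun h => h0r (h ▸ List.mem_cons_self ..)
            have hy4 : y = m + 1 := by
              rw [List.mem_cons] at hm2
              rcases hm2 with hm2 | hm2
              · omega
              · have := (List.pairwise_cons.mp hr).1 _ hm2
                omega
            exact ⟨[], r', by simp [hx1, hy4]⟩

theorem pv_gap_mem (t : List Int) (w : Int) (hs : t.Pairwise (· ≤ ·))
    (h : pvFindGapA t = some w) : (w - 1) ∈ t ∧ (w + 1) ∈ t ∧ w ∉ t := by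
  induction t with
  | nil => simp [pvFindGapA] at h
  | cons a r ih =>
      cases r with
      | nil => simp [pvFindGapA] at h
      | cons b r' =>
          rw [List.pairwise_cons] at hs
          obtain ⟨ha, hr⟩ := hs
          have hb : ∀ y ∈ r', b ≤ y := (List.pairwise_cons.mp hr).1
          simp only [pvFindGapA] at h
          split at h
          · rename_i hab
            obtain rfl : b - 1 = w := Option.some.inj h
            refine ⟨?_, ?_, ?_⟩
            · have : b - 1 - 1 = a := by omega
              rw [this]; exact List.mem_cons_self ..
            · have : b - 1 + 1 = b := by omega
              rw [this]; exact List.mem_cons_of_mem _ (List.mem_cons_self ..)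
            · intro hc
              rw [List.mem_cons, List.mem_cons] at hc
              rcases hc with hc | hc | hc
              · omega
              · omega
              · have := hb _ hc; omega
          · rename_i hab
            obtain ⟨k1, k2, k0⟩ := ih hr h
            have hbw : b ≤ w - 1 := by
              rw [List.mem_cons] at k1
              rcases k1 with k1 | k1
              · omega
              · exact hb _ k1
            have hab' : a ≤ b := ha _ (List.mem_cons_self ..)
            refine ⟨List.mem_cons_of_mem _ k1, List.mem_cons_of_mem _ k2, ?_⟩
            intro hc
            rw [List.mem_cons] at hc
            rcases hc with hc | hc
            · omega
            · exact k0 hc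

theorem pv_gap_min (t : List Int) (w : Int) (hs : t.Pairwise (· ≤ ·))
    (h : pvFindGapA t = some w) :
    ∀ m, (m - 1) ∈ t → (m + 1) ∈ t → m ∉ t → w ≤ m := by
  induction t with
  | nil => simp [pvFindGapA] at h
  | cons a r ih =>
      cases r with
      | nil => simp [pvFindGapA] at h
      | cons b r' =>
          rw [List.pairwise_cons] at hs
          obtain ⟨ha, hr⟩ := hs
          have hb : ∀ y ∈ r', b ≤ y := (List.pairwise_cons.mp hr).1
          have hab' : a ≤ b := ha _ (List.mem_cons_self ..)
          simp only [pvFindGapA] at h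
          split at h
          · rename_i hab
            obtain rfl : b - 1 = w := Option.some.inj h
            intro m hm1 _ _
            rw [List.mem_cons] at hm1
            have : a ≤ m - 1 := by
              rcases hm1 with hm1 | hm1
              · omega
              · exact ha _ hm1
            omega
          · rename_i hab
            intro m hm1 hm2 hm0
            rw [List.mem_cons] at hm1 hm2
            have hm0r : m ∉ b :: r' := fun hc => hm0 (List.mem_cons_of_mem _ hc)
            have ham1 : a ≤ m - 1 := by
              rcases hm1 with hm1 | hm1
              · omega
              · exact ha _ hm1
            have hm2' : m + 1 ∈ b :: r' := by
              rcases hm2 with hm2 | hm2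
              · omega
              · exact hm2
            by_cases hmr : m - 1 ∈ b :: r'
            · exact ih hr h m hmr hm2' hm0r
            · have hx1 : m - 1 = a := by
                rcases hm1 with hm1 | hm1
                · exact hm1
                · exact absurd hm1 hmr
              have hbm1 : b ≠ m - 1 := fun hc => hmr (hc ▸ List.mem_cons_self ..)
              have hbm : b ≠ m := fun hc => hm0r (hc ▸ List.mem_cons_self ..)
              have hble : b ≤ m + 1 := by
                rw [List.mem_cons] at hm2'
                rcases hm2' with hm2' | hm2'
                · omega
                · exact hb _ hm2'
              omega

theorem pv_gap_none (t : List Int) (hs : t.Pairwise (· ≤ ·)) (h : pvFindGapA t = none) :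
    ∀ m, ¬((m - 1) ∈ t ∧ (m + 1) ∈ t ∧ m ∉ t) := by
  rintro m ⟨h1, h2, h0⟩
  obtain ⟨u, v, huv⟩ := pv_split_of_mem t m hs h1 h2 h0
  have := pv_gap_isSome u (m - 1) v
  rw [show m - 1 + 2 = m + 1 by omega, ← huv, h] at this
  simp at this

theorem pv_find_range_none (p : Int → Bool) (a b : Int)
    (h : ∀ k, a ≤ k → k < b → p k = false) :
    (PySem.List.pyRange a b 1).find? p = none := by
  rw [List.find?_eq_none]
  intro x hx
  rw [PySem.List.mem_pyRange_one] at hx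
  simp [h x hx.1 hx.2]

theorem pv_find_range_some (p : Int → Bool) (a b m : Int)
    (h1 : a ≤ m) (h2 : m < b) (hp : p m = true)
    (hmin : ∀ k, a ≤ k → k < m → p k = false) :
    (PySem.List.pyRange a b 1).find? p = some m := by
  rw [PySem.List.pyRange_one_append a m b h1 (by omega), List.find?_append,
      pv_find_range_none p a m hmin, Option.none_or,
      PySem.List.pyRange_one_cons h2]
  simp [hp]

-- the heart: sort-then-adjacent-gap-scan equals ascending candidate scan over the set
theorem pv_main (L : List Int) :
    pvFindGapA (PySem.List.sorted L (fun x => x) false) =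
      (match PySem.List.min? (PySem.Set.ofList L) (fun x => x),
             PySem.List.max? (PySem.Set.ofList L) (fun x => x) with
       | some mn, some mx =>
           (PySem.List.pyRange (mn + 1) mx 1).find?
             (fun m => !(PySem.Set.contains (PySem.Set.ofList L) m)
                 && PySem.Set.contains (PySem.Set.ofList L) (m - 1)
                 && PySem.Set.contains (PySem.Set.ofList L) (m + 1))
       | _, _ => none) := by
  set S := PySem.Set.ofList L with hS
  set t := PySem.List.sorted L (fun x => x) false with ht
  have hmem : ∀ x : Int, PySem.Set.contains S x = true ↔ x ∈ L := by
    intro x; rw [hS, PySem.Set.contains_iff, PySem.Set.mem_ofList]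
  have hmemf : ∀ x : Int, PySem.Set.contains S x = false ↔ x ∉ L := by
    intro x; rw [← hmem x]; cases PySem.Set.contains S x <;> simp
  have hperm : ∀ x : Int, x ∈ t ↔ x ∈ L := fun x => PySem.List.mem_sorted L _ false x
  have hsort : t.Pairwise (· ≤ ·) := by
    have := PySem.List.sorted_pairwise L (fun x => x)
    simpa using this
  by_cases hnil : L = []
  · subst hnil
    rfl
  · have hSne : ∃ z, z ∈ S := by
      obtain ⟨z, hz⟩ := List.exists_mem_of_ne_nil L hnil
      exact ⟨z, (PySem.Set.mem_ofList L z).mpr hz⟩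
    cases hmn : PySem.List.min? S (fun x => x) with
    | none =>
        rw [PySem.List.min?_eq_none_iff] at hmn
        obtain ⟨z, hz⟩ := hSne
        rw [hmn] at hz
        simp at hz
    | some mn =>
    cases hmx : PySem.List.max? S (fun x => x) with
    | none =>
        rw [PySem.List.max?_eq_none_iff] at hmx
        obtain ⟨z, hz⟩ := hSne
        rw [hmx] at hz
        simp at hz
    | some mx =>
    have hmnL : ∀ y ∈ L, mn ≤ y := by
      intro y hy
      exact PySem.List.min?_isMin hmn y ((PySem.Set.mem_ofList L y).mpr hy)
    have hmxL : ∀ y ∈ L, y ≤ mx := by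
      intro y hy
      exact PySem.List.max?_isMax hmx y ((PySem.Set.mem_ofList L y).mpr hy)
    set p : Int → Bool := fun m => !(PySem.Set.contains S m) && PySem.Set.contains S (m - 1)
                  && PySem.Set.contains S (m + 1) with hp
    have hpiff : ∀ m : Int, p m = true ↔ ((m - 1) ∈ L ∧ (m + 1) ∈ L ∧ m ∉ L) := by
      intro m
      rw [hp]
      simp only [Bool.and_eq_true, Bool.not_eq_true', hmem, hmemf]
      tauto
    have hpfalse : ∀ m : Int, ¬((m - 1) ∈ L ∧ (m + 1) ∈ L ∧ m ∉ L) → p m = false := by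
      intro m hm
      cases hc : p m
      · rfl
      · exact absurd ((hpiff m).mp hc) hm
    cases hg : pvFindGapA t with
    | some w =>
        obtain ⟨k1, k2, k0⟩ := pv_gap_mem t w hsort hg
        rw [hperm] at k1 k2
        have hmin : ∀ k, mn + 1 ≤ k → k < w → p k = false := by
          intro k _ hkw
          apply hpfalse
          rintro ⟨j1, j2, j0⟩
          have := pv_gap_min t w hsort hg k ((hperm _).mpr j1) ((hperm _).mpr j2)
                (fun hc => j0 ((hperm k).mp hc))
          omega
        exact (pv_find_range_some p (mn + 1) mx w
              (by have := hmnL _ k1; omega) (by have := hmxL _ k2; omega)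
              ((hpiff w).mpr ⟨k1, k2, fun hc => k0 ((hperm w).mpr hc)⟩)
              hmin).symm
    | none =>
        have hall : ∀ k, mn + 1 ≤ k → k < mx → p k = false := by
          intro k _ _
          apply hpfalse
          rintro ⟨j1, j2, j0⟩
          exact pv_gap_none t hsort hg k ⟨(hperm _).mpr j1, (hperm _).mpr j2,
                fun hc => j0 ((hperm k).mp hc)⟩
        exact (pv_find_range_none p (mn + 1) mx hall).symm

-- ===== VERDICT (by name: the statement is the Claim_ definition above) =====
theorem puzzle10_spec : Claim_equal_puzzle10 := by
  intro inputList _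
  show puzzle10 inputList = puzzle10_alt inputList
  simp only [puzzle10, puzzle10_alt]
  rw [PySem.List.foldl_append_singleton_eq_map, List.nil_append,
      show inputList.map pvDecodeA = inputList.map pvDecodeB from List.map_congr_left (fun c _ => pv_decode_eq c),
      ← PySem.Set.update_map_eq_foldl_add,
      show (PySem.Set.empty : PySem.Set Int) = ([] : List Int) from rfl,
      PySem.Set.update_nil_left]
  exact pv_main (inputList.map pvDecodeB)
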